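-- pv_equiv track=rewrite | github.com/estraier/stgy | scripts/find-nonascii.py | mark_line
-- ===== SOURCE A (Python) =====
-- def mark_line(line, cols, max_len):
--   s = []
--   for i, ch in enumerate(line, start=1):
--     m = ch
--     if i in cols:
--       s.append("⟦" + m + "⟧")
--     else:
--       s.append(m)
--     if max_len and len("".join(s)) >= max_len:
--       s.append(" …")
--       break
--   return "".join(s)
-- ===== SOURCE B (Python) =====
-- def mark_line(line, cols, max_len):
--   tokens = ["\u27e6" + ch + "\u27e7" if i in cols else ch
--             for i, ch in enumerate(line, start=1)]
--   if not max_len: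
--     return "".join(tokens)
--   total = 0
--   for k, t in enumerate(tokens):
--     total += len(t)
--     if total >= max_len:
--       return "".join(tokens[:k + 1]) + " \u2026"
--   return "".join(tokens)
-- ===== Notes on version B (the rewrite author's own statement) =====
-- stated objective: alternative
-- what changed: B splits A's single interleaved loop into two passes: first decorate every character into a token list, then truncate by scanning a running total of token lengths instead of re-joining the accumulator at every step.
import Mathlib
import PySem

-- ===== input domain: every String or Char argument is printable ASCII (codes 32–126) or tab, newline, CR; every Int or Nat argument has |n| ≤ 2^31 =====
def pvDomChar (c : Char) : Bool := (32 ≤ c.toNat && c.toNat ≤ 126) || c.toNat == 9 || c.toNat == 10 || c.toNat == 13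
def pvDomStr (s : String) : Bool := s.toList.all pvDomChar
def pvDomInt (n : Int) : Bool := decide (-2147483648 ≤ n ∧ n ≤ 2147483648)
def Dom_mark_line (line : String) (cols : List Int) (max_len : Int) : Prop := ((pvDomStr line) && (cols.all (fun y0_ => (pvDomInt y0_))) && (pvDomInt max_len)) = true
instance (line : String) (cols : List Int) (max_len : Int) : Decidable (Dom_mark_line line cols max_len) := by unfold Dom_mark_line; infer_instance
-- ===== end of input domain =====

-- B separates decoration from truncation into two passes with a running total
-- (instead of A's interleaved loop that re-joins the accumulator every step); objective: alternative decomposition.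

-- ===== PORT A =====
-- A's single loop: append the (possibly marked) character, then test len("".join(s)) >= max_len.
def pvLoopA (cols : List Int) (max_len : Int) : List (Int × Char) → List String → List String
  | [], s => s
  | (i, ch) :: rest, s =>
    let m := String.ofList [ch]
    let s' := s ++ [if cols.contains i then "⟦" ++ m ++ "⟧" else m]
    if max_len ≠ 0 ∧ max_len ≤ PySem.Str.len (PySem.Str.join "" s') then s' ++ [" …"]
    else pvLoopA cols max_len rest s'

def mark_line (line : String) (cols : List Int) (max_len : Int) : String :=
  PySem.Str.join "" (pvLoopA cols max_len (PySem.List.enumerate line.toList 1) [])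

-- ===== PORT B =====
def pvTokB (cols : List Int) (p : Int × Char) : String :=
  if cols.contains p.1 then "⟦" ++ String.ofList [p.2] ++ "⟧" else String.ofList [p.2]

-- B's second pass: running total of token lengths, first index where it reaches max_len.
def pvFindCutB (max_len : Int) : Int → Nat → List String → Option Nat
  | _, _, [] => none
  | total, k, t :: rest =>
    let total' := total + PySem.Str.len t
    if max_len ≤ total' then some k else pvFindCutB max_len total' (k + 1) rest

def mark_line_alt (line : String) (cols : List Int) (max_len : Int) : String :=
  let tokens := (PySem.List.enumerate line.toList 1).map (pvTokB cols)
  if max_len = 0 then PySem.Str.join "" tokens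
  else
    match pvFindCutB max_len 0 0 tokens with
    | some k => PySem.Str.join "" (tokens.take (k + 1)) ++ " …"
    | none => PySem.Str.join "" tokens

-- ===== PRECONDITION & SPEC =====
def Spec_mark_line (line : String) (cols : List Int) (max_len : Int) (out : String) : Prop := out = mark_line_alt line cols max_len
instance (line : String) (cols : List Int) (max_len : Int) (out : String) : Decidable (Spec_mark_line line cols max_len out) := by unfold Spec_mark_line; infer_instance

-- ===== CLAIM (what is proved, stated in full; the proofs are below) =====
def Claim_equal_mark_line : Prop := ∀ (line : String) (cols : List Int) (max_len : Int), Dom_mark_line line cols max_len → Spec_mark_line line cols max_len (mark_line line cols max_len)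

-- ===== LEMMAS AND PROOFS =====

theorem pv_join_cons (a : String) (l : List String) :
    PySem.Str.join "" (a :: l) = a ++ PySem.Str.join "" l := by
  cases l with
  | nil => simp [PySem.Str.join, PySem.Chars.join, List.intercalate]
  | cons b t =>
      apply String.toList_injective
      simp [PySem.Str.toList_join, PySem.Chars.join_cons_cons]

theorem pv_join_nil : PySem.Str.join "" ([] : List String) = "" := by decide

theorem pv_join_append (l₁ l₂ : List String) :
    PySem.Str.join "" (l₁ ++ l₂) = PySem.Str.join "" l₁ ++ PySem.Str.join "" l₂ := by
  induction l₁ with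
  | nil => simp [pv_join_nil]
  | cons a t ih => simp [pv_join_cons, ih, String.append_assoc]

-- the "cut" of the token list at the first point where the running length reaches max_len
def pvCut (max_len : Int) : Int → List String → List String
  | _, [] => []
  | acc, t :: rest =>
    if max_len ≤ acc + PySem.Str.len t then [t, " …"]
    else t :: pvCut max_len (acc + PySem.Str.len t) rest

theorem pvLoopA_zero (cols : List Int) (ps : List (Int × Char)) (s : List String) :
    pvLoopA cols 0 ps s = s ++ ps.map (pvTokB cols) := by
  induction ps generalizing s with
  | nil => simp [pvLoopA]
  | cons p rest ih => cases p with
    | mk i ch => simp [pvLoopA, ih, pvTokB]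

theorem pvLoopA_cut (cols : List Int) (max_len : Int) (h : max_len ≠ 0)
    (ps : List (Int × Char)) (s : List String) :
    pvLoopA cols max_len ps s
      = s ++ pvCut max_len (PySem.Str.len (PySem.Str.join "" s)) (ps.map (pvTokB cols)) := by
  induction ps generalizing s with
  | nil => simp [pvLoopA, pvCut]
  | cons p rest ih =>
      cases p with
      | mk i ch =>
        have hlen : PySem.Str.len (PySem.Str.join "" (s ++ [pvTokB cols (i, ch)]))
            = PySem.Str.len (PySem.Str.join "" s) + PySem.Str.len (pvTokB cols (i, ch)) := by
          rw [pv_join_append, PySem.Str.len_append, pv_join_cons]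
          simp [PySem.Str.join, PySem.Chars.join]
        simp only [pvLoopA, List.map_cons, pvCut]
        by_cases hc : max_len ≤ PySem.Str.len (PySem.Str.join "" s) + PySem.Str.len (pvTokB cols (i, ch))
        · rw [if_pos ⟨h, by rw [show (if cols.contains i then "⟦" ++ String.ofList [ch] ++ "⟧" else String.ofList [ch]) = pvTokB cols (i, ch) from rfl, hlen]; exact hc⟩,
            if_pos hc]
          simp [pvTokB]
        · rw [if_neg (by
              rw [show (if cols.contains i then "⟦" ++ String.ofList [ch] ++ "⟧" else String.ofList [ch]) = pvTokB cols (i, ch) from rfl, hlen]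
              exact fun hh => hc hh.2),
            if_neg hc]
          rw [show (if cols.contains i then "⟦" ++ String.ofList [ch] ++ "⟧" else String.ofList [ch]) = pvTokB cols (i, ch) from rfl]
          rw [ih (s ++ [pvTokB cols (i, ch)]), hlen]
          simp

theorem pvFindCutB_shift (max_len : Int) (toks : List String) (acc : Int) (k : Nat) :
    pvFindCutB max_len acc k toks = (pvFindCutB max_len acc 0 toks).map (· + k) := by
  induction toks generalizing acc k with
  | nil => simp [pvFindCutB]
  | cons t rest ih =>
      simp only [pvFindCutB]
      simp only [PySem.Str.len_eq, String.length_toList] at *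
      by_cases hc : max_len ≤ acc + (t.length : Int)
      · simp [hc]
      · rw [if_neg hc, if_neg hc, ih _ (k + 1), ih _ 1]
        cases pvFindCutB max_len (acc + (t.length : Int)) 0 rest with
        | none => simp
        | some a => simp; omega

theorem pvFindCutB_cut (max_len : Int) (toks : List String) (acc : Int) :
    (match pvFindCutB max_len acc 0 toks with
      | some k => PySem.Str.join "" (toks.take (k + 1)) ++ " …"
      | none => PySem.Str.join "" toks)
      = PySem.Str.join "" (pvCut max_len acc toks) := by
  induction toks generalizing acc with
  | nil => simp [pvFindCutB, pvCut]
  | cons t rest ih =>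
      simp only [pvFindCutB, pvCut, PySem.Str.len_eq, String.length_toList] at *
      by_cases hc : max_len ≤ acc + (t.length : Int)
      · rw [if_pos hc, if_pos hc]
        simp [pv_join_cons, pv_join_nil]
      · rw [if_neg hc, if_neg hc, pvFindCutB_shift]
        have := ih (acc + (t.length : Int))
        cases hfc : pvFindCutB max_len (acc + (t.length : Int)) 0 rest with
        | none =>
            rw [hfc] at this
            simp [pv_join_cons, ← this]
        | some k =>
            rw [hfc] at this
            simp only [Option.map_some]
            rw [show k + 1 + 1 = (k + 1) + 1 from rfl]
            rw [List.take_succ_cons, pv_join_cons, pv_join_cons, ← this]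
            simp [String.append_assoc]

-- ===== VERDICT (by name: the statement is the Claim_ definition above) =====
theorem mark_line_spec : Claim_equal_mark_line := by
  intro line cols max_len _
  unfold Spec_mark_line mark_line mark_line_alt
  by_cases h : max_len = 0
  · subst h
    rw [pvLoopA_zero]
    simp
  · rw [pvLoopA_cut cols max_len h _ []]
    have h0 : PySem.Str.len (PySem.Str.join "" ([] : List String)) = 0 := by decide
    rw [h0]
    simp only [List.nil_append, if_neg h]
    exact (pvFindCutB_cut max_len _ 0).symm
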